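-- pv_equiv track=rewrite | github.com/ikonomovad/adventofcode_2023 | Day_13/day_13_p1.py | find_pattern_reflection
-- ===== SOURCE A (Python) =====
-- def find_pattern_reflection(pattern, flipped=False):
--     rows_above = 0
--
--     for j in range(len(pattern) - 1, 0, -1):
--         if pattern[0] == pattern[j]:
--             mirroring = True
--
--             # if we find two same rows we should check rows in between to see if they are the same
--             for k in range(1, j // 2 + 1):
--                 if pattern[k] != pattern[j - k]:
--                     mirroring = False
--                     break
--
--             if mirroring:
--                 rows_above = int((j+1)/2)
--                 if flipped:
--                     rows_above = len(pattern) - rows_above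
--                 break
--
--     return rows_above
-- ===== SOURCE B (Python) =====
-- def find_pattern_reflection(pattern, flipped=False):
--     # KMP prefix function of pattern + [None] + reversed(pattern): the final value k
--     # is the length of the longest palindromic prefix of pattern (the longest border
--     # of that sentinel-separated word); the answer is half of it, flag-adjusted.
--     s = list(pattern) + [None] + pattern[::-1]
--     pi = [0]
--     k = 0
--     for x in s[1:]:
--         while k > 0 and x != s[k]:
--             k = pi[k - 1]
--         if x == s[k]:
--             k += 1
--         pi.append(k)
--     rows = k // 2
--     if rows and flipped:
--         rows = len(pattern) - rows
--     return rows
-- ===== Notes on version B (the rewrite author's own statement) =====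
-- stated objective: alternative
-- what changed: A scans candidate reflection widths from the top with a nested half-range row-comparison loop per candidate; B runs the classic KMP prefix-function over pattern + [None] + reversed(pattern) once, whose final value is the longest palindromic prefix length, then maps it to the answer arithmetically.
import Mathlib
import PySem

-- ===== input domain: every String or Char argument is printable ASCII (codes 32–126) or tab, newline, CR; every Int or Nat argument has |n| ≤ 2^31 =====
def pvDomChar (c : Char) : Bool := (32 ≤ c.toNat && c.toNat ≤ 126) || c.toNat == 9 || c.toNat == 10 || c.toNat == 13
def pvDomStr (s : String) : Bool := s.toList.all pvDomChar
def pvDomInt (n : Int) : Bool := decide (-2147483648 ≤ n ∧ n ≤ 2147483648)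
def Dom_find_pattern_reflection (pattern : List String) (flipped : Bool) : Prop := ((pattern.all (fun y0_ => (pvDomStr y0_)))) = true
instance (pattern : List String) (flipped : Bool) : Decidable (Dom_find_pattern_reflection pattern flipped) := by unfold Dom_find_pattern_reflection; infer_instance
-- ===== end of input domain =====

-- B replaces A's backward scan over candidate reflection lines (each with a nested half-range
-- comparison loop) by a single KMP prefix-function pass over pattern + [None] + reversed(pattern),
-- whose final value is the longest palindromic prefix length (objective: alternative algorithm);
-- return values agree everywhere.

-- ===== PORT A =====
-- inner loop 'for k in range(1, j // 2 + 1): if pattern[k] != pattern[j-k]: mirroring = False; break'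
-- (the break does not change the resulting flag, so it is the flag-fold over the same range)
def fprInner (pattern : List String) (j : Int) : Bool :=
  (PySem.List.pyRange 1 (PySem.Int.floordiv j 2 + 1) 1).foldl
    (fun m k =>
      if PySem.List.pyGet? pattern k ≠ PySem.List.pyGet? pattern (j - k) then false else m)
    true

-- outer loop 'for j in range(len(pattern)-1, 0, -1)' with its early 'break' = structural recursion
-- on the countdown range; 'int((j+1)/2)' is exact floor division here since j+1 ≥ 2 (far below 2^53)
def fprLoop (pattern : List String) (flipped : Bool) : List Int → Int
  | [] => 0
  | j :: rest =>
    if PySem.List.pyGet? pattern 0 = PySem.List.pyGet? pattern j then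
      if fprInner pattern j then
        let rows := PySem.Int.floordiv (j + 1) 2
        if flipped then (pattern.length : Int) - rows else rows
      else fprLoop pattern flipped rest
    else fprLoop pattern flipped rest

def find_pattern_reflection (pattern : List String) (flipped : Bool) : Int :=
  fprLoop pattern flipped (PySem.List.pyRange ((pattern.length : Int) - 1) 0 (-1))

-- ===== PORT B =====
-- 'while k > 0 and x != s[k]: k = pi[k-1]' — the fuel argument only makes the loop total
-- (k strictly decreases at every pass, so fuel = k+1 at the call site is never exhausted);
-- s[k] / pi[k-1] are in range whenever the loop runs, so getD is Python's indexing here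
def kmpShrink (s : List (Option String)) (pi : List Nat) (x : Option String) :
    Nat → Nat → Nat
  | 0, k => k
  | fuel + 1, k => if 0 < k ∧ x ≠ s.getD k none then kmpShrink s pi x fuel (pi.getD (k - 1) 0) else k

-- 'for x in s[1:]:' threading the state (pi, k); 'pi.append(k)' = pi ++ [k]
def kmpFold (s : List (Option String)) : List (Option String) → List Nat × Nat → List Nat × Nat
  | [], st => st
  | x :: rest, (pi, k) =>
    let k1 := kmpShrink s pi x (k + 1) k
    let k2 := if x = s.getD k1 none then k1 + 1 else k1
    kmpFold s rest (pi ++ [k2], k2)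

-- 's = list(pattern) + [None] + pattern[::-1]' (strings become 'some', the sentinel None 'none');
-- then the KMP prefix-function loop, 'rows = k // 2' and the flag adjustment
def find_pattern_reflection_alt (pattern : List String) (flipped : Bool) : Int :=
  let s : List (Option String) := pattern.map some ++ [none] ++ pattern.reverse.map some
  let st := kmpFold s (s.drop 1) ([0], 0)
  let rows := PySem.Int.floordiv (st.2 : Int) 2
  if rows ≠ 0 ∧ flipped = true then (pattern.length : Int) - rows else rows

-- ===== PRECONDITION & SPEC =====
def Spec_find_pattern_reflection (pattern : List String) (flipped : Bool) (out : Int) : Prop := out = find_pattern_reflection_alt pattern flipped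
instance (pattern : List String) (flipped : Bool) (out : Int) : Decidable (Spec_find_pattern_reflection pattern flipped out) := by unfold Spec_find_pattern_reflection; infer_instance

-- ===== CLAIM (what is proved, stated in full; the proofs are below) =====
def Claim_equal_find_pattern_reflection : Prop := ∀ (pattern : List String) (flipped : Bool), Dom_find_pattern_reflection pattern flipped → Spec_find_pattern_reflection pattern flipped (find_pattern_reflection pattern flipped)

-- ===== LEMMAS AND PROOFS =====

-- ---- generic border machinery (for B's KMP pass) ----

-- 'k is a proper border of t': the length-k prefix of t equals its length-k suffix
def brdB (t : List (Option String)) (k : Nat) : Bool :=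
  decide (k < t.length) && decide (t.take k = t.drop (t.length - k))

def brd (t : List (Option String)) (k : Nat) : Prop :=
  k < t.length ∧ t.take k = t.drop (t.length - k)

lemma brd_iff (t : List (Option String)) (k : Nat) : brdB t k = true ↔ brd t k := by
  simp [brdB, brd]

-- length of the longest proper border
def maxBord (t : List (Option String)) : Nat :=
  Nat.findGreatest (fun k => brdB t k = true) (t.length - 1)

lemma brd_zero (t : List (Option String)) (h : t ≠ []) : brd t 0 := by
  constructor
  · exact List.length_pos_iff.mpr h
  · simp

lemma le_maxBord (t : List (Option String)) (k : Nat) (h : brd t k) : k ≤ maxBord t :=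
  Nat.le_findGreatest (by have := h.1; omega) ((brd_iff t k).mpr h)

lemma maxBord_brd (t : List (Option String)) (h : t ≠ []) : brd t (maxBord t) := by
  have h0 : brdB t 0 = true := (brd_iff t 0).mpr (brd_zero t h)
  exact (brd_iff t _).mp (Nat.findGreatest_spec (P := fun k => brdB t k = true) (Nat.zero_le _) h0)

lemma maxBord_le (t : List (Option String)) : maxBord t ≤ t.length - 1 :=
  Nat.findGreatest_le _

lemma take_ne_nil (s : List (Option String)) (k : Nat) (h0 : 0 < k) (hs : 0 < s.length) :
    s.take k ≠ [] := by
  intro h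
  have hl := congrArg List.length h
  rw [List.length_take] at hl
  simp only [List.length_nil] at hl
  omega

lemma getD_take (s : List (Option String)) (i r : Nat) (h : r < i) :
    (s.take i).getD r none = s.getD r none := by
  simp [List.getD_eq_getElem?_getD, h]

-- extension: nonzero borders of t ++ [x] are successors of matching borders of t
lemma brd_append_iff (t : List (Option String)) (x : Option String) (b : Nat) :
    brd (t ++ [x]) (b + 1) ↔ brd t b ∧ t.getD b none = x := by
  constructor
  · rintro ⟨h1, h2⟩
    simp only [List.length_append, List.length_singleton] at h1
    have hb : b < t.length := by omega
    have hTake : (t ++ [x]).take (b + 1) = t.take b ++ [t.getD b none] := by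
      rw [List.take_append_of_le_length (by omega), List.take_succ]
      simp [List.getElem?_eq_getElem hb, List.getD_eq_getElem?_getD]
    have hDrop : (t ++ [x]).drop (t.length + 1 - (b + 1)) = t.drop (t.length - b) ++ [x] := by
      have : t.length + 1 - (b + 1) = t.length - b := by omega
      rw [this, List.drop_append_of_le_length (by omega)]
    rw [hTake] at h2
    rw [show (t ++ [x]).length = t.length + 1 by simp] at h2
    rw [hDrop] at h2
    have hlen : (t.take b).length = (t.drop (t.length - b)).length := by
      simp; omega
    obtain ⟨e1, e2⟩ := List.append_inj h2 (by simp; omega)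
    exact ⟨⟨hb, e1⟩, by simpa using e2⟩
  · rintro ⟨⟨hb, he⟩, hx⟩
    refine ⟨by simp; omega, ?_⟩
    have hTake : (t ++ [x]).take (b + 1) = t.take b ++ [t.getD b none] := by
      rw [List.take_append_of_le_length (by omega), List.take_succ]
      simp [List.getElem?_eq_getElem hb, List.getD_eq_getElem?_getD]
    have hDrop : (t ++ [x]).drop ((t ++ [x]).length - (b + 1)) = t.drop (t.length - b) ++ [x] := by
      rw [show (t ++ [x]).length = t.length + 1 by simp, show t.length + 1 - (b + 1) = t.length - b by omega,
        List.drop_append_of_le_length (by omega)]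
    rw [hTake, hDrop, he, hx]

-- chain down: any smaller border of t is a border of t's maxBorder-style prefix
lemma brd_take_of_brd (t : List (Option String)) (k j : Nat)
    (hk : brd t k) (hj : brd t j) (hjk : j < k) : brd (t.take k) j := by
  obtain ⟨hk1, hk2⟩ := hk
  obtain ⟨hj1, hj2⟩ := hj
  have hlen : (t.take k).length = k := by simp; omega
  refine ⟨by omega, ?_⟩
  rw [hlen, List.take_take, min_eq_left (by omega), hk2, List.drop_drop]
  rw [show t.length - k + (k - j) = t.length - j by omega]
  exact hj2

-- chain up: a border of a border-prefix is a border of t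
lemma brd_of_brd_take (t : List (Option String)) (k j : Nat)
    (hk : brd t k) (hj : brd (t.take k) j) : brd t j := by
  obtain ⟨hk1, hk2⟩ := hk
  obtain ⟨hj1, hj2⟩ := hj
  have hlen : (t.take k).length = k := by simp; omega
  rw [hlen] at hj1 hj2
  refine ⟨by omega, ?_⟩
  rw [List.take_take, min_eq_left (by omega)] at hj2
  rw [hk2, List.drop_drop, show t.length - k + (k - j) = t.length - j by omega] at hj2
  exact hj2

-- pi is correct for all prefixes of s of length ≤ pi.length
def piOK (s : List (Option String)) (pi : List Nat) : Prop :=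
  ∀ j, j < pi.length → pi.getD j 0 = maxBord (s.take (j + 1))

lemma maxBord_take_lt (s : List (Option String)) (k : Nat) (h0 : 0 < k) (hk : k ≤ s.length) :
    maxBord (s.take k) < k := by
  have := maxBord_le (s.take k)
  have hlen : (s.take k).length = k := by simp; omega
  omega

-- the while loop lands on the largest matching border (or 0), staying on the border chain
lemma kmpShrink_spec (s : List (Option String)) (pi : List Nat) (x : Option String)
    (i : Nat) (hi1 : 1 ≤ i) (hi2 : i ≤ s.length) (hpiL : i ≤ pi.length) (hpi : piOK s pi) :
    ∀ fuel k, k < fuel → brd (s.take i) k →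
      (∀ b, brd (s.take i) b → k < b → x ≠ s.getD b none) →
      brd (s.take i) (kmpShrink s pi x fuel k) ∧
      (∀ b, brd (s.take i) b → x = s.getD b none → b ≤ kmpShrink s pi x fuel k) ∧
      (x = s.getD (kmpShrink s pi x fuel k) none ∨
        (kmpShrink s pi x fuel k = 0 ∧ x ≠ s.getD 0 none)) := by
  intro fuel
  induction fuel with
  | zero => intro k hk; omega
  | succ fuel ih =>
    intro k hk hbrd hinv
    by_cases hc : 0 < k ∧ x ≠ s.getD k none
    · -- loop body runs: k := pi[k-1] = maxBord (s.take k)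
      have hstep : kmpShrink s pi x (fuel + 1) k = kmpShrink s pi x fuel (pi.getD (k - 1) 0) := by
        simp only [kmpShrink]; rw [if_pos hc]
      have hklen : k < i := by
        have := hbrd.1; simpa [min_eq_left hi2] using this
      have hksub : (s.take i).take k = s.take k := by
        rw [List.take_take, min_eq_left (by omega)]
      have hnext : pi.getD (k - 1) 0 = maxBord (s.take k) := by
        have := hpi (k - 1) (by omega)
        rwa [show k - 1 + 1 = k by omega] at this
      have hlt : maxBord (s.take k) < k := maxBord_take_lt s k hc.1 (by omega)
      have hbrdk : brd (s.take k) (maxBord (s.take k)) :=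
        maxBord_brd _ (take_ne_nil s k hc.1 (by omega))
      have hbrd' : brd (s.take i) (pi.getD (k - 1) 0) := by
        rw [hnext]
        exact brd_of_brd_take _ k _ hbrd (hksub ▸ hbrdk)
      have hinv' : ∀ b, brd (s.take i) b → pi.getD (k - 1) 0 < b → x ≠ s.getD b none := by
        intro b hb hgt
        rcases lt_trichotomy b k with hlt2 | rfl | hgt2
        · exfalso
          have hbt : brd ((s.take i).take k) b := brd_take_of_brd _ k b hbrd hb hlt2
          rw [hksub] at hbt
          have := le_maxBord _ _ hbt
          omega
        · exact hc.2
        · exact hinv b hb hgt2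
      have hfuel : pi.getD (k - 1) 0 < fuel := by
        rw [hnext]; omega
      rw [hstep]
      exact ih (pi.getD (k - 1) 0) hfuel hbrd' hinv'
    · -- loop exits
      have hres : kmpShrink s pi x (fuel + 1) k = k := by
        simp only [kmpShrink]; rw [if_neg hc]
      rw [hres]
      refine ⟨hbrd, ?_, ?_⟩
      · intro b hb hxb
        by_contra hgt
        exact hinv b hb (by omega) hxb
      · rcases Nat.eq_zero_or_pos k with rfl | hpos
        · by_cases hx0 : x = s.getD 0 none
          · exact Or.inl hx0
          · exact Or.inr ⟨rfl, hx0⟩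
        · exact Or.inl (not_not.mp (not_and.mp hc hpos))

-- one iteration of the for loop turns maxBord (s.take i) into maxBord (s.take (i+1))
lemma kmpStep (s : List (Option String)) (pi : List Nat) (i : Nat)
    (hi1 : 1 ≤ i) (hi2 : i < s.length) (hpiL : pi.length = i) (hpi : piOK s pi)
    (x : Option String) (hx : x = s.getD i none) :
    (if x = s.getD (kmpShrink s pi x (maxBord (s.take i) + 1) (maxBord (s.take i))) none
     then kmpShrink s pi x (maxBord (s.take i) + 1) (maxBord (s.take i)) + 1
     else kmpShrink s pi x (maxBord (s.take i) + 1) (maxBord (s.take i))) =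
      maxBord (s.take (i + 1)) := by
  have hne : s.take i ≠ [] := take_ne_nil s i (by omega) (by omega)
  have hbrd0 : brd (s.take i) (maxBord (s.take i)) := maxBord_brd _ hne
  have hinv0 : ∀ b, brd (s.take i) b → maxBord (s.take i) < b → x ≠ s.getD b none := by
    intro b hb hgt; exfalso; have := le_maxBord _ _ hb; omega
  obtain ⟨hr1, hr2, hr3⟩ :=
    kmpShrink_spec s pi x i hi1 (by omega) (by omega) hpi (maxBord (s.take i) + 1)
      (maxBord (s.take i)) (by omega) hbrd0 hinv0
  set r := kmpShrink s pi x (maxBord (s.take i) + 1) (maxBord (s.take i)) with hrdef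
  have hsucc : s.take (i + 1) = s.take i ++ [x] := by
    rw [List.take_succ, hx]
    simp [List.getElem?_eq_getElem hi2, List.getD_eq_getElem?_getD]
  have hrlen : r < i := by
    have := hr1.1; simpa [min_eq_left (le_of_lt hi2)] using this
  by_cases hxr : x = s.getD r none
  · rw [if_pos hxr]
    -- r+1 is a border of s.take (i+1), and the largest one
    have hb1 : brd (s.take (i + 1)) (r + 1) := by
      rw [hsucc, brd_append_iff]
      refine ⟨hr1, ?_⟩
      rw [getD_take s i r hrlen]
      exact hxr.symm
    apply Nat.le_antisymm
    · exact le_maxBord _ _ hb1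
    · have hbm : brd (s.take (i + 1)) (maxBord (s.take (i + 1))) :=
        maxBord_brd _ (take_ne_nil s (i + 1) (by omega) (by omega))
      rcases Nat.eq_zero_or_pos (maxBord (s.take (i + 1))) with hz | hp
      · omega
      · obtain ⟨c, hc⟩ := Nat.exists_eq_add_of_lt hp
        rw [hc] at hbm ⊢
        rw [hsucc, brd_append_iff] at hbm
        simp only [Nat.zero_add] at hbm ⊢
        obtain ⟨hcb, hcx⟩ := hbm
        have hcl : c < i := by
          have := hcb.1; simpa [min_eq_left (le_of_lt hi2)] using this
        have : c ≤ r := hr2 c hcb (by rw [← getD_take s i c hcl]; exact hcx.symm)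
        omega
  · rw [if_neg hxr]
    -- the loop ended at 0 with no match: s.take (i+1) has no nonzero border
    obtain hx' | ⟨hr0, hx0⟩ := hr3
    · exact absurd hx' hxr
    · rw [hr0]
      by_contra hne0
      have hp : 0 < maxBord (s.take (i + 1)) := by omega
      have hbm : brd (s.take (i + 1)) (maxBord (s.take (i + 1))) :=
        maxBord_brd _ (take_ne_nil s (i + 1) (by omega) (by omega))
      obtain ⟨c, hc⟩ := Nat.exists_eq_add_of_lt hp
      rw [hc, hsucc, brd_append_iff] at hbm
      simp only [Nat.zero_add] at hbm
      obtain ⟨hcb, hcx⟩ := hbm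
      have hcl : c < i := by
        have := hcb.1; simpa [min_eq_left (le_of_lt hi2)] using this
      have hcr : c ≤ r := hr2 c hcb (by rw [← getD_take s i c hcl]; exact hcx.symm)
      rw [hr0] at hcr
      interval_cases c
      rw [getD_take s i 0 (by omega)] at hcx
      exact hx0 hcx.symm

-- the fold maintains: pi correct for lengths 1..i, k = maxBord (s.take i)
lemma kmpFold_spec (s : List (Option String)) :
    ∀ (rest : List (Option String)) (pi : List Nat) (i : Nat),
      1 ≤ i → pi.length = i → piOK s pi → rest = s.drop i →
      (kmpFold s rest (pi, maxBord (s.take i))).2 = maxBord s := by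
  intro rest
  induction rest with
  | nil =>
    intro pi i hi hlen hpi hdrop
    have hsl : s.length ≤ i := by
      have := congrArg List.length hdrop; simp at this; omega
    simp only [kmpFold]
    rw [List.take_of_length_le hsl]
  | cons x rest ih =>
    intro pi i hi hlen hpi hdrop
    have hi2 : i < s.length := by
      by_contra h
      rw [List.drop_of_length_le (by omega)] at hdrop
      exact absurd hdrop (by simp)
    have hx : x = s.getD i none := by
      have h0 : (s.drop i)[0]? = some x := by rw [← hdrop]; rfl
      rw [List.getElem?_drop, Nat.add_zero] at h0
      rw [List.getD_eq_getElem?_getD, h0]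
      rfl
    have hrest : rest = s.drop (i + 1) := by
      have := congrArg List.tail hdrop
      simpa [List.tail_drop] using this
    have hstep := kmpStep s pi i hi hi2 hlen hpi x hx
    simp only [kmpFold]
    rw [hstep]
    apply ih (pi ++ [maxBord (s.take (i + 1))]) (i + 1) (by omega) (by simp [hlen]) ?_ hrest
    intro j hj
    simp only [List.length_append, List.length_singleton, hlen] at hj
    rcases Nat.lt_or_ge j i with hji | hji
    · rw [List.getD_append _ _ _ _ (by omega)]
      exact hpi j (by omega)
    · have hje : j = i := by omega
      subst hje
      simp [List.getD_eq_getElem?_getD, hlen]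

-- ---- borders of pattern ++ [None] ++ reversed(pattern) = palindromic prefixes ----

lemma sentinel_getElem? (pattern : List String) :
    (pattern.map some ++ [none] ++ pattern.reverse.map some)[pattern.length]? =
      some (none : Option String) := by
  rw [List.append_assoc, List.getElem?_append_right (by simp)]
  simp

lemma s_take (pattern : List String) (k : Nat) (hk : k ≤ pattern.length) :
    (pattern.map some ++ [none] ++ pattern.reverse.map some).take k =
      (pattern.take k).map some := by
  rw [List.append_assoc, List.take_append_of_le_length (by simp; omega), List.map_take]

lemma s_drop (pattern : List String) (k : Nat) (hk : k ≤ pattern.length) :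
    (pattern.map some ++ [none] ++ pattern.reverse.map some).drop
        (pattern.length + 1 + pattern.length - k) =
      ((pattern.take k).map some).reverse := by
  rw [List.drop_append, List.drop_of_length_le (by simp; omega), List.nil_append]
  simp only [List.length_append, List.length_map, List.length_cons, List.length_nil]
  rw [show pattern.length + 1 + pattern.length - k - (pattern.length + 0 + 1) =
        pattern.length - k by omega]
  rw [List.map_reverse, List.drop_reverse, List.length_map]
  rw [show pattern.length - (pattern.length - k) = k by omega, List.map_take]

lemma s_length (pattern : List String) :
    (pattern.map some ++ [none] ++ pattern.reverse.map some).length =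
      pattern.length + 1 + pattern.length := by
  simp only [List.length_append, List.length_map, List.length_cons, List.length_nil,
    List.length_reverse]

lemma brd_s_iff (pattern : List String) (k : Nat) :
    brd (pattern.map some ++ [none] ++ pattern.reverse.map some) k ↔
      k ≤ pattern.length ∧ pattern.take k = (pattern.take k).reverse := by
  constructor
  · rintro ⟨h1, h2⟩
    rw [s_length] at h1
    rw [s_length] at h2
    rcases Nat.lt_or_ge pattern.length k with hkn | hkn
    case inr =>
      refine ⟨hkn, ?_⟩
      rw [s_take pattern k hkn, s_drop pattern k hkn, ← List.map_reverse] at h2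
      exact List.map_injective_iff.mpr (Option.some_injective _) h2
    case inl =>
      exfalso
      -- position pattern.length holds the sentinel on the left, a string on the right
      have hEl : ((pattern.map some ++ [none] ++ pattern.reverse.map some).take
          k)[pattern.length]? = some (none : Option String) := by
        rw [List.getElem?_take_of_lt hkn]
        exact sentinel_getElem? pattern
      have hix : pattern.length + 1 + pattern.length - k + pattern.length =
          (pattern.map some ++ [none]).length + (2 * pattern.length - k) := by
        simp only [List.length_append, List.length_map, List.length_cons, List.length_nil]
        omega
      have hEr : ∃ y : String, ((pattern.map some ++ [none] ++ pattern.reverse.map some).drop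
          (pattern.length + 1 + pattern.length - k))[pattern.length]? = some (some y) := by
        rw [List.getElem?_drop, hix, List.getElem?_append_right (Nat.le_add_right _ _),
          Nat.add_sub_cancel_left]
        have hm : 2 * pattern.length - k < (pattern.reverse.map some).length := by
          simp; omega
        rw [List.getElem?_eq_getElem hm]
        simp only [List.getElem_map]
        exact ⟨_, rfl⟩
      obtain ⟨y, hy⟩ := hEr
      rw [h2] at hEl
      rw [hEl] at hy
      simp at hy
  · rintro ⟨hkn, hpal⟩
    refine ⟨by rw [s_length]; omega, ?_⟩
    rw [s_length, s_take pattern k hkn, s_drop pattern k hkn, ← List.map_reverse]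
    exact congrArg (List.map some) hpal


-- the KMP pass on s computes the longest palindromic prefix length of pattern
lemma alt_k_eq (pattern : List String) :
    (kmpFold (pattern.map some ++ [none] ++ pattern.reverse.map some)
      ((pattern.map some ++ [none] ++ pattern.reverse.map some).drop 1) ([0], 0)).2 =
    maxBord (pattern.map some ++ [none] ++ pattern.reverse.map some) := by
  set s := pattern.map some ++ [none] ++ pattern.reverse.map some with hs
  have hlen : 1 ≤ s.length := by rw [hs, s_length]; omega
  have h1 : maxBord (s.take 1) = 0 := by
    have := maxBord_le (s.take 1)
    have : (s.take 1).length ≤ 1 := by simp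
    omega
  have := kmpFold_spec s (s.drop 1) [0] 1 le_rfl rfl ?_ rfl
  · rw [← this, h1]
  · intro j hj
    simp only [List.length_singleton] at hj
    interval_cases j
    simp [h1]

-- ---- A-side machinery (from the loop to "first palindromic prefix, widths n..2") ----

def fprPost (pattern : List String) (flipped : Bool) (best : Int) : Int :=
  let rows := PySem.Int.floordiv best 2
  if rows ≠ 0 ∧ flipped = true then (pattern.length : Int) - rows else rows

def fprFirst (pattern : List String) : List Int → Int
  | [] => 0
  | m :: rest =>
    if PySem.List.slice pattern none (some m) = (PySem.List.slice pattern none (some m)).reverse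
    then m else fprFirst pattern rest

def PalP (pattern : List String) (j : Nat) : Prop :=
  ∀ i : Nat, i ≤ j → pattern[i]? = pattern[j - i]?

lemma foldl_if_false (p : Int → Prop) [DecidablePred p] (l : List Int) (b : Bool) :
    l.foldl (fun m k => if p k then false else m) b = (b && l.all fun k => !(decide (p k))) := by
  induction l generalizing b with
  | nil => simp
  | cons a l ih =>
    simp only [List.foldl_cons, List.all_cons, ih]
    by_cases h : p a <;> simp [h]

lemma inner_iff (pattern : List String) (j : Nat) :
    fprInner pattern (j : Int) = true ↔
      ∀ k : Nat, 1 ≤ k → k ≤ j / 2 → pattern[k]? = pattern[j - k]? := by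
  unfold fprInner
  rw [foldl_if_false (p := fun k => PySem.List.pyGet? pattern k ≠ PySem.List.pyGet? pattern ((j:Int) - k))]
  have h2 : PySem.Int.floordiv (j : Int) 2 = ((j / 2 : Nat) : Int) := by
    exact_mod_cast PySem.Int.floordiv_natCast j 2
  simp only [Bool.true_and, List.all_eq_true, PySem.List.mem_pyRange_one, h2]
  constructor
  · intro H k hk1 hk2
    have := H (k : Int) ⟨by exact_mod_cast hk1, by omega⟩
    simp only [Bool.not_eq_eq_eq_not, Bool.not_true, decide_eq_false_iff_not, not_not] at this
    have hcast : (j : Int) - (k : Int) = ((j - k : Nat) : Int) := by omega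
    rw [hcast] at this
    simpa [PySem.List.pyGet?_natCast] using this
  · intro H k ⟨hk1, hk2⟩
    simp only [Bool.not_eq_eq_eq_not, Bool.not_true, decide_eq_false_iff_not, not_not]
    obtain ⟨kn, rfl⟩ : ∃ kn : Nat, k = (kn : Int) := ⟨k.toNat, by omega⟩
    have hkn1 : 1 ≤ kn := by exact_mod_cast hk1
    have hkn2 : kn ≤ j / 2 := by exact_mod_cast Int.lt_add_one_iff.mp hk2
    have hcast : (j : Int) - (kn : Int) = ((j - kn : Nat) : Int) := by omega
    rw [hcast]
    simpa [PySem.List.pyGet?_natCast] using H kn hkn1 hkn2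

lemma anchor_inner_iff_palP (pattern : List String) (j : Nat) (h0 : 0 < j)
    (hj : j < pattern.length) :
    (PySem.List.pyGet? pattern 0 = PySem.List.pyGet? pattern (j : Int) ∧
      fprInner pattern (j : Int) = true) ↔ PalP pattern j := by
  rw [inner_iff]
  constructor
  · rintro ⟨anchor, inner⟩
    have hanch : pattern[0]? = pattern[j]? := by
      simpa [PySem.List.pyGet?_zero, PySem.List.pyGet?_natCast] using anchor
    intro i hi
    rcases Nat.lt_or_ge (j / 2) i with hbig | hsmall
    · rcases Nat.eq_zero_or_pos (j - i) with hz | hp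
      · have : i = j := by omega
        subst this; simpa [hz] using hanch.symm
      · have hk2 : j - i ≤ j / 2 := by omega
        have := inner (j - i) hp hk2
        rw [Nat.sub_sub_self hi] at this
        exact this.symm
    · rcases Nat.eq_zero_or_pos i with rfl | hp
      · simpa using hanch
      · exact inner i hp hsmall
  · intro H
    refine ⟨?_, fun k hk1 hk2 => H k (by omega)⟩
    simpa [PySem.List.pyGet?_zero, PySem.List.pyGet?_natCast] using H 0 (by omega)

lemma take_palindrome_iff_palP (pattern : List String) (j : Nat) (hj : j < pattern.length) :
    pattern.take (j + 1) = (pattern.take (j + 1)).reverse ↔ PalP pattern j := by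
  have hlen : (pattern.take (j + 1)).length = j + 1 := by simp; omega
  constructor
  · intro h i hi
    have hi1 : i < (pattern.take (j+1)).length := by omega
    have := congrArg (fun l => l[i]?) h
    simp only at this
    rw [List.getElem?_eq_getElem hi1,
        List.getElem?_eq_getElem (by simp [hlen]; omega : i < (pattern.take (j+1)).reverse.length)] at this
    rw [List.getElem_reverse] at this
    rw [List.getElem_take, List.getElem_take] at this
    simp only [hlen] at this
    have e1 : j + 1 - 1 - i = j - i := by omega
    rw [List.getElem?_eq_getElem (by omega : i < pattern.length),
        List.getElem?_eq_getElem (by omega : j - i < pattern.length)]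
    simp only [Option.some.injEq]
    simpa [e1] using this
  · intro H
    apply List.ext_getElem (by simp)
    intro i h1 h2
    rw [List.getElem_reverse, List.getElem_take, List.getElem_take]
    simp only [hlen]
    have hi : i ≤ j := by omega
    have := H i hi
    rw [List.getElem?_eq_getElem (by omega : i < pattern.length),
        List.getElem?_eq_getElem (by omega : j - i < pattern.length)] at this
    simp only [Option.some.injEq] at this
    simp [this]

lemma cond_equiv (pattern : List String) (j : Int) (h0 : 0 < j)
    (hj : j < (pattern.length : Int)) :
    (PySem.List.pyGet? pattern 0 = PySem.List.pyGet? pattern j ∧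
      fprInner pattern j = true) ↔
    PySem.List.slice pattern none (some (j + 1)) =
      (PySem.List.slice pattern none (some (j + 1))).reverse := by
  obtain ⟨jn, rfl⟩ : ∃ jn : Nat, j = (jn : Int) := ⟨j.toNat, by omega⟩
  have hjn0 : 0 < jn := by exact_mod_cast h0
  have hjn : jn < pattern.length := by exact_mod_cast hj
  rw [PySem.List.slice_to pattern (b := (jn:Int)+1) (by omega)]
  have ht : ((jn : Int) + 1).toNat = jn + 1 := by omega
  rw [ht, take_palindrome_iff_palP pattern jn hjn]
  exact anchor_inner_iff_palP pattern jn hjn0 hjn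

lemma loop_eq_first (pattern : List String) (flipped : Bool) :
    ∀ l : List Int, (∀ j ∈ l, 0 < j ∧ j < (pattern.length : Int)) →
      fprLoop pattern flipped l = fprPost pattern flipped (fprFirst pattern (l.map (· + 1))) := by
  intro l
  induction l with
  | nil => intro _; simp [fprLoop, fprFirst, fprPost, PySem.Int.floordiv]
  | cons j rest ih =>
    intro hb
    obtain ⟨⟨hj0, hjn⟩, hrest⟩ : (0 < j ∧ j < (pattern.length : Int)) ∧ _ :=
      ⟨hb j (List.mem_cons_self), fun x hx => hb x (List.mem_cons_of_mem _ hx)⟩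
    simp only [List.map_cons, fprFirst]
    by_cases hC : PySem.List.slice pattern none (some (j + 1)) =
        (PySem.List.slice pattern none (some (j + 1))).reverse
    · obtain ⟨hanch, hinner⟩ := (cond_equiv pattern j hj0 hjn).mpr hC
      have hrows : PySem.Int.floordiv (j + 1) 2 = (j + 1) / 2 :=
        PySem.Int.floordiv_eq_ediv_of_pos (by omega)
      have hne : (j + 1) / 2 ≠ 0 := by omega
      simp only [fprLoop, if_pos hanch, hinner, if_true, if_pos hC, fprPost, hrows]
      cases flipped <;> simp [hne]
    · have hrec : fprLoop pattern flipped (j :: rest) = fprLoop pattern flipped rest := by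
        by_cases hanch : PySem.List.pyGet? pattern 0 = PySem.List.pyGet? pattern j
        · have hinner : ¬ fprInner pattern j = true := fun hi =>
            hC ((cond_equiv pattern j hj0 hjn).mp ⟨hanch, hi⟩)
          simp [fprLoop, hanch, hinner]
        · simp [fprLoop, hanch]
      rw [hrec, if_neg hC, ih hrest]

lemma map_range_shift (n : Int) :
    (PySem.List.pyRange (n - 1) 0 (-1)).map (· + 1) = PySem.List.pyRange n 1 (-1) := by
  rw [PySem.List.pyRange_neg_one, PySem.List.pyRange_neg_one, List.map_map]
  have he : (n - 1 - 0).toNat = (n - 1).toNat := by omega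
  rw [he]
  exact List.map_congr_left (fun k _ => by simp [Function.comp]; ring)

-- ---- fprFirst over the countdown range, characterised by the LARGEST palindromic width L ----

lemma slice_pal_iff (pattern : List String) (m : Nat) :
    (PySem.List.slice pattern none (some (m : Int)) =
      (PySem.List.slice pattern none (some (m : Int))).reverse) ↔
    pattern.take m = (pattern.take m).reverse := by
  rw [PySem.List.slice_to pattern (b := (m : Int)) (by omega)]
  simp

lemma first_of_none (pattern : List String) (c : Nat)
    (h : ∀ m : Nat, 2 ≤ m → m ≤ c → ¬ pattern.take m = (pattern.take m).reverse) :
    fprFirst pattern (PySem.List.pyRange (c : Int) 1 (-1)) = 0 := by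
  induction c with
  | zero => rw [PySem.List.pyRange_neg_one_eq_nil (by omega)]; rfl
  | succ c ih =>
    rcases Nat.lt_or_ge c 1 with hc | hc
    · interval_cases c
      rw [PySem.List.pyRange_neg_one_eq_nil (by omega)]; rfl
    · rw [PySem.List.pyRange_neg_one_cons (by exact_mod_cast Nat.lt_succ_of_le hc)]
      simp only [fprFirst]
      rw [if_neg]
      · rw [show ((c + 1 : Nat) : Int) - 1 = (c : Int) by push_cast; ring]
        exact ih (fun m h2 hm => h m h2 (by omega))
      · rw [show ((c + 1 : Nat) : Int) = (((c + 1 : Nat) : Nat) : Int) by norm_cast, slice_pal_iff]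
        exact h (c + 1) (by omega) le_rfl

lemma first_of_yes (pattern : List String) (L : Nat) (hL : 2 ≤ L)
    (hpal : pattern.take L = (pattern.take L).reverse) :
    ∀ c : Nat, L ≤ c →
      (∀ m : Nat, L < m → m ≤ c → ¬ pattern.take m = (pattern.take m).reverse) →
      fprFirst pattern (PySem.List.pyRange (c : Int) 1 (-1)) = (L : Int) := by
  intro c
  induction c with
  | zero => intro h; omega
  | succ c ih =>
    intro hLe hmax
    rcases Nat.lt_or_ge c L with hc | hc
    · have : c + 1 = L := by omega
      subst this
      rw [PySem.List.pyRange_neg_one_cons (by exact_mod_cast (by omega : (1:Nat) < c + 1))]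
      simp only [fprFirst]
      rw [if_pos]
      rw [show ((c + 1 : Nat) : Int) = (((c + 1 : Nat) : Nat) : Int) by norm_cast, slice_pal_iff]
      exact hpal
    · rw [PySem.List.pyRange_neg_one_cons (by exact_mod_cast (by omega : (1:Nat) < c + 1))]
      simp only [fprFirst]
      rw [if_neg]
      · rw [show ((c + 1 : Nat) : Int) - 1 = (c : Int) by push_cast; ring]
        exact ih hc (fun m h1 h2 => hmax m h1 (by omega))
      · rw [show ((c + 1 : Nat) : Int) = (((c + 1 : Nat) : Nat) : Int) by norm_cast, slice_pal_iff]
        exact hmax (c + 1) (by omega) le_rfl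

-- ===== VERDICT (by name: the statement is the Claim_ definition above) =====
theorem find_pattern_reflection_spec : Claim_equal_find_pattern_reflection := by
  intro pattern flipped _dom
  unfold Spec_find_pattern_reflection find_pattern_reflection find_pattern_reflection_alt
  rw [loop_eq_first pattern flipped _ (fun j hj => by
    rw [PySem.List.mem_pyRange_neg_one] at hj; exact ⟨hj.1, by omega⟩)]
  rw [map_range_shift]
  simp only
  rw [alt_k_eq pattern]
  set L := maxBord (pattern.map some ++ [none] ++ pattern.reverse.map some) with hLdef
  have hLb : L ≤ pattern.length ∧ pattern.take L = (pattern.take L).reverse := by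
    rw [← brd_s_iff]
    exact maxBord_brd _ (by simp)
  have hLmax : ∀ m : Nat, m ≤ pattern.length →
      pattern.take m = (pattern.take m).reverse → m ≤ L := by
    intro m hm hp
    exact le_maxBord _ _ ((brd_s_iff pattern m).mpr ⟨hm, hp⟩)
  rcases Nat.lt_or_ge L 2 with hL2 | hL2
  · -- no palindromic prefix of width ≥ 2: A's first-hit is 0, B's rows = L // 2 = 0
    rw [first_of_none pattern pattern.length
      (fun m h2 hm hp => by have := hLmax m hm hp; omega)]
    have : PySem.Int.floordiv ((L : Nat) : Int) 2 = ((L / 2 : Nat) : Int) := by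
      exact_mod_cast PySem.Int.floordiv_natCast L 2
    rw [fprPost, this]
    have hL0 : L / 2 = 0 := by omega
    simp [hL0, PySem.Int.floordiv]
  · rw [first_of_yes pattern L hL2 hLb.2 pattern.length hLb.1
      (fun m h1 h2 hp => by have := hLmax m h2 hp; omega)]
    rfl
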